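-- pv_equiv track=rewrite | github.com/potatowon/codingtest | 백준/Silver/4659. 비밀번호 발음하기/비밀번호 발음하기.py | is_acceptable
-- ===== SOURCE A (Python) =====
-- def is_acceptable(password):
--     모음 = "aeiou"
--     모음여부 = False
--     연속_모음 = 0
--     연속_자음 = 0
--     prev_char = None
--
--     for char in password:
--         # 모음 여부 판단
--         if char in 모음: # 모음인경우 모음 추가
--             모음여부 = True
--             연속_모음 += 1
--             연속_자음 = 0
--         else: # 자음인 경우 자음추가
--             연속_자음 += 1
--             연속_모음 = 0
--
--         # 연속 판단
--         if 연속_모음 == 3 or 연속_자음 == 3: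
--             return False
--
--         # 같은 문자인경우 판단
--         if char == prev_char:
--             if char != 'e' and char != 'o':
--                 return False
--
--         prev_char = char
--
--     # 모음 여부 판단 반환
--     return 모음여부
-- ===== SOURCE B (Python) =====
-- def is_acceptable(password):
--     pat = ['v' if c in 'aeiou' else 'c' for c in password]
--     has_vowel = 'v' in pat
--     no_triple = all(not (a == b == c) for a, b, c in zip(pat, pat[1:], pat[2:]))
--     no_bad_repeat = all(a != b or a in 'eo' for a, b in zip(password, password[1:]))
--     return has_vowel and no_triple and no_bad_repeat
-- ===== Notes on version B (the rewrite author's own statement) =====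
-- stated objective: simpler
-- what changed: Replaces A's single accumulator pass with run counters and early returns by building a vowel/consonant classification list once and evaluating the three rules as independent zip-based scans combined with a conjunction.
import Mathlib
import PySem

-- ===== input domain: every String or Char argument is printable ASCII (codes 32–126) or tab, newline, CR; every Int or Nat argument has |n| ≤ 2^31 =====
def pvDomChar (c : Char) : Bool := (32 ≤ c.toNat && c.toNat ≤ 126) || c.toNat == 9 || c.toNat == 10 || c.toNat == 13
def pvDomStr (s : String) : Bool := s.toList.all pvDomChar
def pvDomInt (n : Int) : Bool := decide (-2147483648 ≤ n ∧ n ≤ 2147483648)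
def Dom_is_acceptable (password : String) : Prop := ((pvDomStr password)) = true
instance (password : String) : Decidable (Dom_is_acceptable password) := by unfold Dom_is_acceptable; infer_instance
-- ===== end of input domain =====

-- B replaces A's single accumulator pass (run counters + early returns) by a classification
-- list built once and three independent zip-based rule scans; objective: simpler.

-- ===== PORT A =====
-- the for-loop of A with its accumulator state (vowel seen, vowel run, consonant run, prev char)
def isAcceptableGoA : List Char → Bool → Nat → Nat → Option Char → Bool
  | [], vw, _, _, _ => vw
  | ch :: rest, vw, cv, cc, prev =>
    let vw' := if "aeiou".toList.contains ch then true else vw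
    let cv' := if "aeiou".toList.contains ch then cv + 1 else 0
    let cc' := if "aeiou".toList.contains ch then 0 else cc + 1
    if cv' = 3 ∨ cc' = 3 then false
    else if some ch = prev then
      if ch ≠ 'e' ∧ ch ≠ 'o' then false
      else isAcceptableGoA rest vw' cv' cc' (some ch)
    else isAcceptableGoA rest vw' cv' cc' (some ch)

def is_acceptable (password : String) : Bool :=
  isAcceptableGoA password.toList false 0 0 none

-- ===== PORT B =====
-- 'v' if c in 'aeiou' else 'c'
def pvCls (c : Char) : Char := if "aeiou".toList.contains c then 'v' else 'c'

def is_acceptable_alt (password : String) : Bool :=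
  let l := password.toList
  let pat := l.map pvCls
  let hasVowel := pat.contains 'v'
  let noTriple := (pat.zip (pat.tail.zip pat.tail.tail)).all
    (fun p => !(p.1 == p.2.1 && p.2.1 == p.2.2))
  let noBadRepeat := (l.zip l.tail).all
    (fun p => p.1 != p.2 || "eo".toList.contains p.1)
  hasVowel && noTriple && noBadRepeat

-- ===== PRECONDITION & SPEC =====
def Spec_is_acceptable (password : String) (out : Bool) : Prop := out = is_acceptable_alt password
instance (password : String) (out : Bool) : Decidable (Spec_is_acceptable password out) := by unfold Spec_is_acceptable; infer_instance

-- ===== CLAIM (what is proved, stated in full; the proofs are below) =====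
def Claim_equal_is_acceptable : Prop := ∀ (password : String), Dom_is_acceptable password → Spec_is_acceptable password (is_acceptable password)

-- ===== LEMMAS AND PROOFS =====

-- recursive characterisations of B's zip-based scans
def noTripleR : List Char → Bool
  | a :: b :: c :: t => !(a == b && b == c) && noTripleR (b :: c :: t)
  | _ => true

def noRepR : List Char → Bool
  | a :: b :: t => (a != b || "eo".toList.contains a) && noRepR (b :: t)
  | _ => true

theorem zipTriple (l : List Char) :
    ((l.zip (l.tail.zip l.tail.tail)).all
      (fun p => !(p.1 == p.2.1 && p.2.1 == p.2.2))) = noTripleR l := by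
  match l with
  | [] => rfl
  | [_] => rfl
  | [_, _] => rfl
  | a :: b :: c :: t =>
    have ih := zipTriple (b :: c :: t)
    simp only [List.tail_cons, List.zip_cons_cons, List.all_cons] at *
    rw [ih]
    rfl

theorem zipRep (l : List Char) :
    ((l.zip l.tail).all (fun p => p.1 != p.2 || "eo".toList.contains p.1)) = noRepR l := by
  match l with
  | [] => rfl
  | [_] => rfl
  | a :: b :: t =>
    have ih := zipRep (b :: t)
    simp only [List.tail_cons, List.zip_cons_cons, List.all_cons] at *
    rw [ih]
    rfl

theorem hasVowel_eq (l : List Char) :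
    (l.map pvCls).contains 'v' = l.any (fun c => "aeiou".toList.contains c) := by
  induction l with
  | nil => rfl
  | cons a t ih =>
    by_cases h : ("aeiou".toList.contains a) = true
    · have hv : pvCls a = 'v' := by unfold pvCls; rw [if_pos h]
      simp only [List.map_cons, List.contains_cons, List.any_cons, hv, h, ih, Bool.true_or]
      rfl
    · have hv : pvCls a = 'c' := by unfold pvCls; rw [if_neg h]
      have hb : "aeiou".toList.contains a = false := by
        cases hx : "aeiou".toList.contains a
        · rfl
        · exact absurd hx h
      simp only [List.map_cons, List.contains_cons, List.any_cons, hv, hb, ih,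
        Bool.false_or]
      rfl

-- B's value, written through the recursive characterisations
def specB (l : List Char) : Bool :=
  (l.any fun c => "aeiou".toList.contains c) && noTripleR (l.map pvCls) && noRepR l

theorem alt_eq (s : String) : is_acceptable_alt s = specB s.toList := by
  unfold is_acceptable_alt specB
  simp only [zipTriple, zipRep, hasVowel_eq]

theorem noTripleR_fire (x : Char) (t : List Char) :
    noTripleR (x :: x :: x :: t) = false := by
  simp [noTripleR]

theorem noTripleR_cross1 {x y : Char} (hxy : x ≠ y) (t : List Char) :
    noTripleR (x :: y :: t) = noTripleR (y :: t) := by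
  have hb : (x == y) = false := beq_eq_false_iff_ne.mpr hxy
  cases t with
  | nil => rfl
  | cons c t' => simp only [noTripleR, hb, Bool.false_and, Bool.not_false, Bool.true_and]

theorem noTripleR_cross2 {x y : Char} (hxy : x ≠ y) (t : List Char) :
    noTripleR (x :: x :: y :: t) = noTripleR (y :: t) := by
  have hb : (x == y) = false := beq_eq_false_iff_ne.mpr hxy
  rw [show noTripleR (x :: x :: y :: t) = (!(x == x && x == y) && noTripleR (x :: y :: t)) from rfl]
  simp only [BEq.rfl, hb, Bool.and_false, Bool.not_false, Bool.true_and]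
  exact noTripleR_cross1 hxy t

theorem noRepR_pass {p ch : Char} (h : (p != ch || "eo".toList.contains p) = true)
    (rest : List Char) : noRepR (p :: ch :: rest) = noRepR (ch :: rest) := by
  rw [show noRepR (p :: ch :: rest)
      = ((p != ch || "eo".toList.contains p) && noRepR (ch :: rest)) from rfl, h, Bool.true_and]

theorem noRepR_fail {p ch : Char} (h : (p != ch || "eo".toList.contains p) = false)
    (rest : List Char) : noRepR (p :: ch :: rest) = false := by
  rw [show noRepR (p :: ch :: rest)
      = ((p != ch || "eo".toList.contains p) && noRepR (ch :: rest)) from rfl, h, Bool.false_and]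

theorem eo_contains_true {ch : Char} (h : ch = 'e' ∨ ch = 'o') :
    ("eo".toList.contains ch) = true := by
  rcases h with h | h <;> subst h <;> decide

theorem eo_contains_false {ch : Char} (he : ch ≠ 'e') (ho : ch ≠ 'o') :
    ("eo".toList.contains ch) = false := by
  have h1 : (ch == 'e') = false := beq_eq_false_iff_ne.mpr he
  have h2 : (ch == 'o') = false := beq_eq_false_iff_ne.mpr ho
  simp [he, ho]

-- the loop of A, run from a state reached after reading a block of r equal-class
-- characters ending in p, equals B's three rules on the padded remainder
theorem go_spec (l : List Char) : ∀ (vw : Bool) (p : Char) (r : Nat), (r = 1 ∨ r = 2) →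
    isAcceptableGoA l vw
      (if "aeiou".toList.contains p then r else 0)
      (if "aeiou".toList.contains p then 0 else r) (some p)
    = ((vw || l.any fun c => "aeiou".toList.contains c)
        && noTripleR (List.replicate r (pvCls p) ++ l.map pvCls) && noRepR (p :: l)) := by
  induction l with
  | nil =>
    intro vw p r hr
    have hrep1 : noTripleR (List.replicate 1 (pvCls p) ++ ([] : List Char)) = true := rfl
    have hrep2 : noTripleR (List.replicate 2 (pvCls p) ++ ([] : List Char)) = true := rfl
    have hnr : noRepR [p] = true := rfl
    rcases hr with h | h <;> subst h <;>
      by_cases hp : ("aeiou".toList.contains p) = true <;>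
        simp only [isAcceptableGoA, List.any_nil, Bool.or_false, List.map_nil,
          hrep1, hrep2, hnr, Bool.and_true, hp, if_true, if_false]
  | cons ch rest ih =>
    intro vw p r hr
    by_cases hc : ("aeiou".toList.contains ch) = true <;>
      by_cases hp : ("aeiou".toList.contains p) = true
    · -- vowel after vowel block
      have hclseq : pvCls ch = pvCls p := by unfold pvCls; rw [if_pos hc, if_pos hp]
      rcases hr with h | h
      · subst h
        simp only [isAcceptableGoA, hc, hp, Nat.reduceAdd, Nat.reduceEqDiff, if_true, if_false, Bool.false_eq_true, Bool.true_eq_false, or_false, false_or, or_true, true_or, or_self, eq_self_iff_true]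
        have hrep : List.replicate 1 (pvCls p) ++ List.map pvCls (ch :: rest)
            = List.replicate 2 (pvCls ch) ++ List.map pvCls rest := by
          simp [List.replicate, hclseq]
        by_cases heq : ch = p
        · subst heq
          by_cases heo : (ch ≠ 'e' ∧ ch ≠ 'o')
          · rw [if_pos rfl, if_pos heo]
            have hbad : (ch != ch || "eo".toList.contains ch) = false := by
              rw [eo_contains_false heo.1 heo.2]; simp
            rw [noRepR_fail hbad rest, Bool.and_false]
          · rw [if_pos rfl, if_neg heo]
            have ihh := ih true ch 2 (Or.inr rfl)
            rw [if_pos hc, if_pos hc] at ihh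
            rw [ihh, hrep]
            have hok : (ch != ch || "eo".toList.contains ch) = true := by
              rw [eo_contains_true (by
                by_cases he : ch = 'e'
                · exact Or.inl he
                · exact Or.inr (by
                    by_contra ho
                    exact heo ⟨he, ho⟩))]
              simp
            rw [noRepR_pass hok rest]
            simp only [List.any_cons, hc]
            cases vw <;> rfl
        · rw [if_neg (by simpa using heq)]
          have ihh := ih true ch 2 (Or.inr rfl)
          rw [if_pos hc, if_pos hc] at ihh
          rw [ihh, hrep]
          have hok : (p != ch || "eo".toList.contains p) = true := by
            have : (p != ch) = true := by simp [bne, Ne.symm heq]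
            rw [this, Bool.true_or]
          rw [noRepR_pass hok rest]
          simp only [List.any_cons, hc]
          cases vw <;> rfl
      · subst h
        simp only [isAcceptableGoA, hc, hp, Nat.reduceAdd, Nat.reduceEqDiff, if_true, if_false, Bool.false_eq_true, Bool.true_eq_false, or_false, false_or, or_true, true_or, or_self, eq_self_iff_true]
        have hrep : List.replicate 2 (pvCls p) ++ List.map pvCls (ch :: rest)
            = pvCls p :: pvCls p :: pvCls p :: List.map pvCls rest := by
          simp [List.replicate, hclseq]
        rw [hrep, noTripleR_fire, Bool.and_false, Bool.false_and]
    · -- vowel after consonant block: ch ≠ p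
      have heq : ch ≠ p := fun h => hp (h ▸ hc)
      have hclsne : pvCls p ≠ pvCls ch := by
        unfold pvCls
        rw [if_pos hc, if_neg hp]
        decide
      simp only [isAcceptableGoA, hc, hp, Nat.reduceAdd, Nat.reduceEqDiff, if_true, if_false, Bool.false_eq_true, Bool.true_eq_false, or_false, false_or, or_true, true_or, or_self, eq_self_iff_true]
      rw [if_neg (show ¬ (some ch = some p) by simpa using heq)]
      have ihh := ih true ch 1 (Or.inl rfl)
      rw [if_pos hc, if_pos hc] at ihh
      rw [ihh]
      have hok : (p != ch || "eo".toList.contains p) = true := by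
        have : (p != ch) = true := by simp [bne, Ne.symm heq]
        rw [this, Bool.true_or]
      rw [noRepR_pass hok rest]
      have h1 : List.replicate 1 (pvCls ch) ++ List.map pvCls rest
          = pvCls ch :: List.map pvCls rest := rfl
      rcases hr with h | h <;> subst h
      · have h2 : List.replicate 1 (pvCls p) ++ List.map pvCls (ch :: rest)
            = pvCls p :: pvCls ch :: List.map pvCls rest := rfl
        rw [h1, h2, noTripleR_cross1 hclsne]
        simp only [List.any_cons, hc]
        cases vw <;> rfl
      · have h2 : List.replicate 2 (pvCls p) ++ List.map pvCls (ch :: rest)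
            = pvCls p :: pvCls p :: pvCls ch :: List.map pvCls rest := rfl
        rw [h1, h2, noTripleR_cross2 hclsne]
        simp only [List.any_cons, hc]
        cases vw <;> rfl
    · -- consonant after vowel block: ch ≠ p
      have heq : ch ≠ p := fun h => hc (h ▸ hp)
      have hclsne : pvCls p ≠ pvCls ch := by
        unfold pvCls
        rw [if_neg hc, if_pos hp]
        decide
      simp only [isAcceptableGoA, hc, hp, Nat.reduceAdd, Nat.reduceEqDiff, if_true, if_false, Bool.false_eq_true, Bool.true_eq_false, or_false, false_or, or_true, true_or, or_self, eq_self_iff_true]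
      rw [if_neg (show ¬ (some ch = some p) by simpa using heq)]
      have ihh := ih vw ch 1 (Or.inl rfl)
      rw [if_neg hc, if_neg hc] at ihh
      rw [ihh]
      have hok : (p != ch || "eo".toList.contains p) = true := by
        have : (p != ch) = true := by simp [bne, Ne.symm heq]
        rw [this, Bool.true_or]
      rw [noRepR_pass hok rest]
      have hcf : ("aeiou".toList.contains ch) = false := by
        cases hx : "aeiou".toList.contains ch
        · rfl
        · exact absurd hx hc
      have h1 : List.replicate 1 (pvCls ch) ++ List.map pvCls rest
          = pvCls ch :: List.map pvCls rest := rfl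
      rcases hr with h | h <;> subst h
      · have h2 : List.replicate 1 (pvCls p) ++ List.map pvCls (ch :: rest)
            = pvCls p :: pvCls ch :: List.map pvCls rest := rfl
        rw [h1, h2, noTripleR_cross1 hclsne]
        simp only [List.any_cons, hcf]
        cases vw <;> rfl
      · have h2 : List.replicate 2 (pvCls p) ++ List.map pvCls (ch :: rest)
            = pvCls p :: pvCls p :: pvCls ch :: List.map pvCls rest := rfl
        rw [h1, h2, noTripleR_cross2 hclsne]
        simp only [List.any_cons, hcf]
        cases vw <;> rfl
    · -- consonant after consonant block
      have hclseq : pvCls ch = pvCls p := by unfold pvCls; rw [if_neg hc, if_neg hp]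
      have hcf : ("aeiou".toList.contains ch) = false := by
        cases hx : "aeiou".toList.contains ch
        · rfl
        · exact absurd hx hc
      rcases hr with h | h
      · subst h
        simp only [isAcceptableGoA, hc, hp, Nat.reduceAdd, Nat.reduceEqDiff, if_true, if_false, Bool.false_eq_true, Bool.true_eq_false, or_false, false_or, or_true, true_or, or_self, eq_self_iff_true]
        have hrep : List.replicate 1 (pvCls p) ++ List.map pvCls (ch :: rest)
            = List.replicate 2 (pvCls ch) ++ List.map pvCls rest := by
          simp [List.replicate, hclseq]
        by_cases heq : ch = p
        · subst heq
          by_cases heo : (ch ≠ 'e' ∧ ch ≠ 'o')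
          · rw [if_pos rfl, if_pos heo]
            have hbad : (ch != ch || "eo".toList.contains ch) = false := by
              rw [eo_contains_false heo.1 heo.2]; simp
            rw [noRepR_fail hbad rest, Bool.and_false]
          · rw [if_pos rfl, if_neg heo]
            have ihh := ih vw ch 2 (Or.inr rfl)
            rw [if_neg hc, if_neg hc] at ihh
            rw [ihh, hrep]
            have hok : (ch != ch || "eo".toList.contains ch) = true := by
              rw [eo_contains_true (by
                by_cases he : ch = 'e'
                · exact Or.inl he
                · exact Or.inr (by
                    by_contra ho
                    exact heo ⟨he, ho⟩))]
              simp
            rw [noRepR_pass hok rest]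
            simp only [List.any_cons, hcf]
            cases vw <;> rfl
        · rw [if_neg (by simpa using heq)]
          have ihh := ih vw ch 2 (Or.inr rfl)
          rw [if_neg hc, if_neg hc] at ihh
          rw [ihh, hrep]
          have hok : (p != ch || "eo".toList.contains p) = true := by
            have : (p != ch) = true := by simp [bne, Ne.symm heq]
            rw [this, Bool.true_or]
          rw [noRepR_pass hok rest]
          simp only [List.any_cons, hcf]
          cases vw <;> rfl
      · subst h
        simp only [isAcceptableGoA, hc, hp, Nat.reduceAdd, Nat.reduceEqDiff, if_true, if_false, Bool.false_eq_true, Bool.true_eq_false, or_false, false_or, or_true, true_or, or_self, eq_self_iff_true]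
        have hrep : List.replicate 2 (pvCls p) ++ List.map pvCls (ch :: rest)
            = pvCls p :: pvCls p :: pvCls p :: List.map pvCls rest := by
          simp [List.replicate, hclseq]
        rw [hrep, noTripleR_fire, Bool.and_false, Bool.false_and]

-- ===== VERDICT (by name: the statement is the Claim_ definition above) =====
theorem is_acceptable_spec : Claim_equal_is_acceptable := by
  intro password _
  unfold Spec_is_acceptable
  rw [alt_eq]
  unfold is_acceptable
  cases hl : password.toList with
  | nil => rfl
  | cons ch rest =>
    by_cases hc : ("aeiou".toList.contains ch) = true
    · simp only [isAcceptableGoA, hc, Nat.reduceAdd, Nat.reduceEqDiff, if_true, if_false, Bool.false_eq_true, Bool.true_eq_false, or_false, false_or, or_true, true_or, or_self, eq_self_iff_true]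
      rw [if_neg (show ¬ (some ch = (none : Option Char)) by simp)]
      have ihh := go_spec rest true ch 1 (Or.inl rfl)
      rw [if_pos hc, if_pos hc] at ihh
      rw [ihh]
      unfold specB
      simp only [List.any_cons, hc, List.map_cons]
      rfl
    · simp only [isAcceptableGoA, hc, Nat.reduceAdd, Nat.reduceEqDiff, if_true, if_false, Bool.false_eq_true, Bool.true_eq_false, or_false, false_or, or_true, true_or, or_self, eq_self_iff_true]
      rw [if_neg (show ¬ (some ch = (none : Option Char)) by simp)]
      have ihh := go_spec rest false ch 1 (Or.inl rfl)
      rw [if_neg hc, if_neg hc] at ihh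
      rw [ihh]
      have hcf : ("aeiou".toList.contains ch) = false := by
        cases hx : "aeiou".toList.contains ch
        · rfl
        · exact absurd hx hc
      unfold specB
      simp only [List.any_cons, hcf, List.map_cons]
      rfl
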